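-- pv_equiv track=rewrite | github.com/chrisjames88/python_console_game | guess_the_no.py | getclue
-- ===== SOURCE A (Python) =====
-- def getclue(guess, secretnum):
--     if guess == secretnum:
--         return "you got it"
--     clues = []
--
--     for i in range(len(guess)):
--         if guess[i] == secretnum[i]:
--             clues.append("fermi")
--         elif guess[i] in secretnum:
--             clues.append("pico")
--     if len(clues) == 0:
--         return "bagels"
--     else:
--         clues.sort()
--         return ' '.join(clues)
-- ===== SOURCE B (Python) =====
-- def getclue(guess, secretnum):
--     if guess == secretnum:
--         return "you got it"
--     secret_chars = set(secretnum)
--     hits = sum(c in secret_chars for c in guess)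
--     fermi = sum(a == b for a, b in zip(guess, secretnum))
--     if hits == 0:
--         return "bagels"
--     return ' '.join(['fermi'] * fermi + ['pico'] * (hits - fermi))
-- ===== Notes on version B (the rewrite author's own statement) =====
-- stated objective: simpler
-- what changed: Replaces A's per-position append/elif/sort/join pipeline with set-membership counting: a set of secretnum's characters built once, hits = membership count over the guess, fermi = equal-pair count over zip(guess, secretnum), and pico derived arithmetically as hits - fermi; the grouped answer is built directly with no clue list and no sort.
import Mathlib
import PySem

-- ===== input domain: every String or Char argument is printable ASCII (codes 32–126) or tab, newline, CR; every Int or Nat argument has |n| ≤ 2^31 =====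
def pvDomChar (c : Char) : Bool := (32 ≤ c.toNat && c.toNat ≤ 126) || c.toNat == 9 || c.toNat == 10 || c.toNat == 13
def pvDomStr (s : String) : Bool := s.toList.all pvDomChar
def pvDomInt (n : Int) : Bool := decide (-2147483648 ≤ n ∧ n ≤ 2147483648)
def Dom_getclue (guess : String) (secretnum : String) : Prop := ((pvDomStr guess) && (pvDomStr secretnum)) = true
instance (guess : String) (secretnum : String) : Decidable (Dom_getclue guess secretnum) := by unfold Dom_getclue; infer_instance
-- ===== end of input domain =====

-- B drops A's per-position append/elif/sort pipeline: it counts matches over zip and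
-- membership hits against a set built once, and derives pico = hits - fermi (simpler; no sort).

-- ===== PORT A =====
-- A's loop body: append "fermi" / "pico" to the clue list (default char for the
-- out-of-range secretnum[i] is never reached inside Pre_getclue).
def getclueStep (g s : List Char) (clues : List String) (i : Int) : List String :=
  if PySem.List.pyGetD g i ' ' == PySem.List.pyGetD s i ' ' then clues ++ ["fermi"]
  else if PySem.Chars.isIn [PySem.List.pyGetD g i ' '] s then clues ++ ["pico"]
  else clues

def getclue (guess : String) (secretnum : String) : String :=
  if guess == secretnum then "you got it"
  else
    let g := guess.toList
    let s := secretnum.toList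
    let clues := (PySem.List.pyRange 0 (g.length : Int) 1).foldl (getclueStep g s) []
    if clues.length == 0 then "bagels"
    else PySem.Str.join " " (PySem.List.sorted clues (fun x => x) false)

-- ===== PORT B =====
def getclue_alt (guess : String) (secretnum : String) : String :=
  if guess == secretnum then "you got it"
  else
    let secretChars := PySem.Set.ofList secretnum.toList
    let hits : Int :=
      guess.toList.foldl (fun acc c => acc + (if secretChars.contains c then 1 else 0)) 0
    let fermi : Int :=
      (guess.toList.zip secretnum.toList).foldl
        (fun acc p => acc + (if p.1 == p.2 then 1 else 0)) 0
    if hits == 0 then "bagels"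
    else PySem.Str.join " "
      (PySem.List.pyRepeat ["fermi"] fermi ++ PySem.List.pyRepeat ["pico"] (hits - fermi))

-- ===== PRECONDITION & SPEC =====
-- A (and only A) raises IndexError at secretnum[i] when guess is longer than secretnum
-- and differs from it; exactly those inputs are excluded.
def Pre_getclue (guess : String) (secretnum : String) : Prop :=
  guess = secretnum ∨ guess.toList.length ≤ secretnum.toList.length
instance (guess : String) (secretnum : String) : Decidable (Pre_getclue guess secretnum) := by unfold Pre_getclue; infer_instance

def pvWitness_getclue : String × String := ("123", "345")

def Spec_getclue (guess : String) (secretnum : String) (out : String) : Prop := out = getclue_alt guess secretnum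
instance (guess : String) (secretnum : String) (out : String) : Decidable (Spec_getclue guess secretnum out) := by unfold Spec_getclue; infer_instance

-- ===== CLAIM (what is proved, stated in full; the proofs are below) =====
def Claim_equal_getclue : Prop := ∀ (guess : String) (secretnum : String), Dom_getclue guess secretnum → Pre_getclue guess secretnum → Spec_getclue guess secretnum (getclue guess secretnum)

-- ===== LEMMAS AND PROOFS =====

-- one clue of A's loop, as a function of the character pair
def clueOf (s : List Char) (p : Char × Char) : List String :=
  if p.1 == p.2 then ["fermi"] else if p.1 ∈ s then ["pico"] else []

-- single-character 'in' on strings is list membership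
theorem isIn_singleton (c : Char) (s : List Char) :
    PySem.Chars.isIn [c] s = decide (c ∈ s) := by
  by_cases h : c ∈ s
  · simp only [h, decide_true]
    exact (PySem.Chars.isIn_iff_infix _ _).mpr
      (by rcases List.mem_iff_append.mp h with ⟨u, v, rfl⟩
          exact ⟨u, v, by simp⟩)
  · simp only [h, decide_false]
    rw [← Bool.not_eq_true, PySem.Chars.isIn_iff_infix]
    intro hinf
    exact h (hinf.subset (by simp))

-- flatMap over the index range = flatMap over the list itself
theorem flatMap_range_getD {α β : Type} (d : α) (h : α → List β) :
    ∀ (l : List α),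
      (List.range l.length).flatMap (fun k => h (l.getD k d)) = l.flatMap h := by
  intro l
  induction l with
  | nil => simp
  | cons x t ih =>
    simp only [List.length_cons, List.range_succ_eq_map, List.flatMap_cons, List.flatMap_map]
    simpa using congrArg (fun r => h x ++ r) ih

-- A's clue list is clueOf mapped over the zipped characters
theorem getclue_fold_eq_flatMap (g s : List Char) (hlen : g.length ≤ s.length) :
    (PySem.List.pyRange 0 (g.length : Int) 1).foldl (getclueStep g s) []
      = (g.zip s).flatMap (clueOf s) := by
  have hstep : getclueStep g s = fun acc i => acc ++
      (clueOf s (PySem.List.pyGetD g i ' ', PySem.List.pyGetD s i ' ')) := by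
    funext acc i
    unfold getclueStep clueOf
    simp only [isIn_singleton]
    split_ifs <;> simp_all
  rw [hstep, PySem.List.foldl_append_eq_flatMap, List.nil_append, PySem.List.pyRange_one]
  have hz : (g.zip s).length = g.length := by simp [List.length_zip]; omega
  rw [List.flatMap_map, ← hz, ← flatMap_range_getD (' ', ' ') (clueOf s) (g.zip s)]
  apply List.flatMap_congr  -- may not exist; fallback below
  intro k hk
  have hk' : k < (g.zip s).length := List.mem_range.mp hk
  have hkg : k < g.length := by omega
  have hks : k < s.length := by omega
  have h1 : PySem.List.pyGetD g ((0:Int) + k) ' ' = g[k] := by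
    simp [PySem.List.pyGetD_natCast, hkg]
  have h2 : PySem.List.pyGetD s ((0:Int) + k) ' ' = s[k] := by
    simp [PySem.List.pyGetD_natCast, hks]
  rw [h1, h2, List.getD_eq_getElem _ _ hk', List.getElem_zip]

-- counts of "fermi" / "pico" in the flatMap, and its length
theorem count_fermi_flatMap (s : List Char) (z : List (Char × Char)) :
    (z.flatMap (clueOf s)).count "fermi" = z.countP (fun p => p.1 == p.2) := by
  induction z with
  | nil => simp
  | cons p t ih =>
    simp only [List.flatMap_cons, List.count_append, List.countP_cons, ih]
    unfold clueOf
    split_ifs <;> simp_all <;> omega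
theorem count_pico_flatMap (s : List Char) (z : List (Char × Char)) :
    (z.flatMap (clueOf s)).count "pico"
      = z.countP (fun p => !(p.1 == p.2) && decide (p.1 ∈ s)) := by
  induction z with
  | nil => simp
  | cons p t ih =>
    simp only [List.flatMap_cons, List.count_append, List.countP_cons, ih]
    unfold clueOf
    split_ifs <;> simp_all <;> omega
theorem length_flatMap_clueOf (s : List Char) (z : List (Char × Char)) :
    (z.flatMap (clueOf s)).length
      = z.countP (fun p => p.1 == p.2) + z.countP (fun p => !(p.1 == p.2) && decide (p.1 ∈ s)) := by
  induction z with
  | nil => simp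
  | cons p t ih =>
    simp only [List.flatMap_cons, List.length_append, List.countP_cons, ih]
    unfold clueOf
    split_ifs <;> simp_all <;> omega

-- hits = fermi-count + pico-count (every second component of the zip is in s)
theorem countP_mem_split (s : List Char) (z : List (Char × Char))
    (hz : ∀ p ∈ z, p.2 ∈ s) :
    z.countP (fun p => decide (p.1 ∈ s))
      = z.countP (fun p => p.1 == p.2) + z.countP (fun p => !(p.1 == p.2) && decide (p.1 ∈ s)) := by
  induction z with
  | nil => simp
  | cons p t ih =>
    have hp2 : p.2 ∈ s := hz p (List.mem_cons_self)
    have ht := ih (fun q hq => hz q (List.mem_cons_of_mem _ hq))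
    simp only [List.countP_cons, ht]
    by_cases he : p.1 = p.2
    · have hd : decide (p.1 ∈ s) = true := by rw [he]; simp [hp2]
      have hb : (p.1 == p.2) = true := by simp [he]
      simp [hd, hb]
      omega
    · have hb : (p.1 == p.2) = false := by simp [he]
      simp [hb]
      split_ifs <;> omega

-- B's integer fold-sums are countP casts
theorem foldl_sum_if {α : Type} (p : α → Bool) (l : List α) :
    ∀ (a : Int), l.foldl (fun acc x => acc + (if p x then 1 else 0)) a = a + l.countP p := by
  induction l with
  | nil => simp
  | cons x t ih =>
    intro a
    simp only [List.foldl_cons, ih, List.countP_cons]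
    split_ifs with h <;> simp [h] <;> omega

-- a list of only "fermi"/"pico" is a permutation of the grouped form
theorem perm_grouped (c : List String) (h : ∀ x ∈ c, x = "fermi" ∨ x = "pico") :
    (List.replicate (c.count "fermi") "fermi" ++ List.replicate (c.count "pico") "pico").Perm c := by
  induction c with
  | nil => simp
  | cons x t ih =>
    have ht : ∀ y ∈ t, y = "fermi" ∨ y = "pico" := fun y hy => h y (List.mem_cons_of_mem _ hy)
    rcases h x (List.mem_cons_self) with rfl | rfl
    · have : t.count "fermi" + 1 = ("fermi" :: t).count "fermi" := by simp
      rw [← this, List.replicate_succ]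
      simpa [List.count_cons] using (ih ht).cons "fermi"
    · have h1 : ("pico" :: t).count "fermi" = t.count "fermi" := by simp
      have h2 : ("pico" :: t).count "pico" = t.count "pico" + 1 := by simp
      rw [h1, h2, List.replicate_succ]
      exact (List.perm_middle).trans ((ih ht).cons "pico")

-- sorting a fermi/pico clue list groups the fermis before the picos
theorem sorted_grouped (c : List String) (h : ∀ x ∈ c, x = "fermi" ∨ x = "pico") :
    PySem.List.sorted c (fun x => x) false
      = List.replicate (c.count "fermi") "fermi" ++ List.replicate (c.count "pico") "pico" := by
  apply PySem.List.sorted_id_eq_of_perm_of_pairwise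
  · exact perm_grouped c h
  · rw [List.pairwise_append]
    refine ⟨List.pairwise_replicate.mpr (Or.inr le_rfl),
            List.pairwise_replicate.mpr (Or.inr le_rfl), ?_⟩
    intro a ha b hb
    rw [List.eq_of_mem_replicate ha, List.eq_of_mem_replicate hb]
    exact le_of_lt (by rw [String.lt_iff_toList_lt]; decide)

-- every element of the flatMap is "fermi" or "pico"
theorem mem_flatMap_clueOf (s : List Char) (z : List (Char × Char)) :
    ∀ x ∈ z.flatMap (clueOf s), x = "fermi" ∨ x = "pico" := by
  intro x hx
  rcases List.mem_flatMap.mp hx with ⟨p, _, hp⟩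
  unfold clueOf at hp
  split_ifs at hp <;> simp_all

-- ===== VERDICT (by name: the statement is the Claim_ definition above) =====
theorem getclue_spec : Claim_equal_getclue := by
  intro guess secretnum _ hpre
  unfold Spec_getclue getclue getclue_alt
  by_cases heq : guess == secretnum
  · simp [heq]
  · have hne : guess ≠ secretnum := by simpa using heq
    have hlen : guess.toList.length ≤ secretnum.toList.length := by
      rcases hpre with h | h
      · exact absurd h hne
      · exact h
    simp only [heq, if_false, Bool.false_eq_true]
    set g := guess.toList
    set s := secretnum.toList
    set z := g.zip s with hzdef
    have hflat := getclue_fold_eq_flatMap g s hlen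
    rw [hflat]
    -- B's counters as countP
    have hcontains : ∀ c, PySem.Set.contains (PySem.Set.ofList s) c = decide (c ∈ s) := by
      intro c
      by_cases h : c ∈ s
      · simp only [h, decide_true]
        exact (PySem.Set.contains_iff _ _).mpr ((PySem.Set.mem_ofList _ _).mpr h)
      · simp only [h, decide_false]
        rw [← Bool.not_eq_true, PySem.Set.contains_iff, PySem.Set.mem_ofList]
        exact h
    have hhits : g.foldl (fun acc c => acc + (if PySem.Set.contains (PySem.Set.ofList s) c then 1 else 0)) 0
        = (g.countP (fun c => decide (c ∈ s)) : Int) := by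
      rw [show (fun acc c => acc + (if PySem.Set.contains (PySem.Set.ofList s) c = true then (1:Int) else 0))
            = fun acc c => acc + (if decide (c ∈ s) = true then 1 else 0) from
          funext fun acc => funext fun c => by rw [hcontains c]]
      simpa using foldl_sum_if (fun c => decide (c ∈ s)) g 0
    have hfermi : z.foldl (fun acc p => acc + (if p.1 == p.2 then 1 else 0)) 0
        = (z.countP (fun p => p.1 == p.2) : Int) := by
      simpa using foldl_sum_if (fun p => p.1 == p.2) z 0
    -- hits over g = hits over z
    have hg : g.countP (fun c => decide (c ∈ s)) = z.countP (fun p => decide (p.1 ∈ s)) := by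
      conv_lhs => rw [← List.map_fst_zip hlen]
      rw [List.countP_map]; rfl
    have hz2 : ∀ p ∈ z, p.2 ∈ s := fun p hp => (List.of_mem_zip hp).2
    have hsplit := countP_mem_split s z hz2
    set F := z.countP (fun p => p.1 == p.2) with hF
    set P := z.countP (fun p => !(p.1 == p.2) && decide (p.1 ∈ s)) with hP
    rw [hhits, hfermi, hg, hsplit]
    have hlenflat := length_flatMap_clueOf s z
    by_cases h0 : F + P = 0
    · have hb1 : ((List.flatMap (clueOf s) z).length == 0) = true := by
        rw [beq_iff_eq, hlenflat, ← hF, ← hP]; omega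
      have hb2 : (((F + P : ℕ) : Int) == 0) = true := by
        rw [beq_iff_eq]; exact_mod_cast h0
      rw [hb1, hb2]
      simp
    · have hb1 : ((List.flatMap (clueOf s) z).length == 0) = false := by
        rw [beq_eq_false_iff_ne, ne_eq, hlenflat, ← hF, ← hP]; omega
      have hb2 : (((F + P : ℕ) : Int) == 0) = false := by
        rw [beq_eq_false_iff_ne]
        intro hc
        exact h0 (by exact_mod_cast hc)
      rw [hb1, hb2]
      simp only [Bool.false_eq_true, if_false]
      rw [sorted_grouped _ (mem_flatMap_clueOf s z), count_fermi_flatMap,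
          count_pico_flatMap, ← hF, ← hP]
      have e2 : ((F + P : ℕ) : Int) - (F : Int) = (P : Int) := by push_cast; ring
      rw [PySem.List.pyRepeat_singleton, PySem.List.pyRepeat_singleton, e2]
      simp
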